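-- pv_equiv track=rewrite | github.com/paulklemstine/factor | spectral_diagnostic2.py | orbit_bfs
-- ===== SOURCE A (Python) =====
-- MATRICES = [
--     ((2, -1), (1, 0)),   # M0
--     ((2, 1), (1, 0)),    # M1
--     ((1, 2), (0, 1)),    # M2
--     ((1, 0), (2, 1)),    # M3
--     ((0, 1), (1, 2)),    # M4
--     ((-1, 2), (0, 1)),   # M5
--     ((1, -2), (0, 1)),   # M6
--     ((0, 1), (-1, 2)),   # M7
--     ((2, -1), (0, 1)),   # M8
-- ]
--
-- def apply_mat(mat, m, n, p):
--     (a, b), (c, d) = mat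
--     return (a * m + b * n) % p, (c * m + d * n) % p
--
-- def orbit_bfs(p):
--     """BFS orbit size — only for small p."""
--     visited = set()
--     queue = [(2 % p, 1 % p)]
--     visited.add(queue[0])
--     while queue:
--         nxt = []
--         for m, n in queue:
--             for mat in MATRICES:
--                 s = apply_mat(mat, m, n, p)
--                 if s not in visited:
--                     visited.add(s)
--                     nxt.append(s)
--         queue = nxt
--     return len(visited)
-- ===== SOURCE B (Python) =====
-- MATRICES = [
--     ((2, -1), (1, 0)),   # M0
--     ((2, 1), (1, 0)),    # M1
--     ((1, 2), (0, 1)),    # M2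
--     ((1, 0), (2, 1)),    # M3
--     ((0, 1), (1, 2)),    # M4
--     ((-1, 2), (0, 1)),   # M5
--     ((1, -2), (0, 1)),   # M6
--     ((0, 1), (-1, 2)),   # M7
--     ((2, -1), (0, 1)),   # M8
-- ]
--
-- def apply_mat(mat, m, n, p):
--     (a, b), (c, d) = mat
--     return (a * m + b * n) % p, (c * m + d * n) % p
--
-- def orbit_bfs(p):
--     """Orbit size by fixed-point iteration: rescan the whole visited set each
--     round (no frontier queue) until a full pass adds nothing new."""
--     visited = {(2 % p, 1 % p)}
--     while True:
--         old = len(visited)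
--         for m, n in list(visited):
--             for mat in MATRICES:
--                 visited.add(apply_mat(mat, m, n, p))
--         if len(visited) == old:
--             return len(visited)
-- ===== Notes on version B (the rewrite author's own statement) =====
-- stated objective: alternative
-- what changed: Replaces the frontier-queue BFS (per-level nxt list) by a fixed-point iteration that rescans the entire accumulated visited set every round and stops when a full pass adds no new state.
import Mathlib
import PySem

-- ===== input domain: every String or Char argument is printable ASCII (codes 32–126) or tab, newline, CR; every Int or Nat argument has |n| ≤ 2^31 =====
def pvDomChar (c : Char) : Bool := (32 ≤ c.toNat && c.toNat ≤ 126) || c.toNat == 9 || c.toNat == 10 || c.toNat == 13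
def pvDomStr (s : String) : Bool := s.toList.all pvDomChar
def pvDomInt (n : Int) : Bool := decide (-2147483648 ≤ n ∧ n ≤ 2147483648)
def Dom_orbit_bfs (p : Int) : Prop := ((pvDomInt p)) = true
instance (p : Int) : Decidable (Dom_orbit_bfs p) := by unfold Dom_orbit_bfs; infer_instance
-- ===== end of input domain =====

-- B replaces A's frontier-queue BFS by whole-set fixed-point iteration (alternative decomposition; same results).
-- Python's `set` is ported as Std.HashSet (same membership/size semantics; neither program's result depends on set order).

-- ===== PORT A =====
def pvMats : List ((Int × Int) × (Int × Int)) :=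
  [((2, -1), (1, 0)), ((2, 1), (1, 0)), ((1, 2), (0, 1)), ((1, 0), (2, 1)),
   ((0, 1), (1, 2)), ((-1, 2), (0, 1)), ((1, -2), (0, 1)), ((0, 1), (-1, 2)),
   ((2, -1), (0, 1))]

def pvApplyMat (mat : (Int × Int) × (Int × Int)) (m n p : Int) : Int × Int :=
  (PySem.Int.mod (mat.1.1 * m + mat.1.2 * n) p, PySem.Int.mod (mat.2.1 * m + mat.2.2 * n) p)

-- one step of A's inner `for mat in MATRICES` loop; state = (visited, nxt)
def pvStepA (p : Int) (mn : Int × Int)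
    (st : Std.HashSet (Int × Int) × List (Int × Int)) (mat : (Int × Int) × (Int × Int)) :
    Std.HashSet (Int × Int) × List (Int × Int) :=
  let s := pvApplyMat mat mn.1 mn.2 p
  if st.1.contains s then st else (st.1.insert s, st.2 ++ [s])

-- A's `while queue` loop; fuel p²+1 is a totality guard only (every non-final round
-- grows visited, which holds distinct residue pairs mod p, so ≤ p.natAbs² rounds occur);
-- the equivalence proof does not rely on fuel sufficiency: both ports share the fuel
def pvLoopA (p : Int) (fuel : Nat) (visited : Std.HashSet (Int × Int))
    (queue : List (Int × Int)) : Int :=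
  match fuel with
  | 0 => (visited.size : Int)
  | Nat.succ fuel =>
    if queue = [] then (visited.size : Int)
    else
      let st := queue.foldl (fun st mn => pvMats.foldl (pvStepA p mn) st) (visited, [])
      pvLoopA p fuel st.1 st.2

def orbit_bfs (p : Int) : Int :=
  let s0 : Int × Int := (PySem.Int.mod 2 p, PySem.Int.mod 1 p)
  pvLoopA p (p.natAbs * p.natAbs + 1) ((∅ : Std.HashSet (Int × Int)).insert s0) [s0]

-- ===== PORT B =====
-- one step of B's inner `for mat in MATRICES` loop: visited.add(apply_mat(...))
def pvStepB (p : Int) (mn : Int × Int) (acc : Std.HashSet (Int × Int))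
    (mat : (Int × Int) × (Int × Int)) : Std.HashSet (Int × Int) :=
  acc.insert (pvApplyMat mat mn.1 mn.2 p)

-- one full pass of B: scan a snapshot (`list(visited)`) of the whole visited set, adding every image
def pvPassB (p : Int) (visited : Std.HashSet (Int × Int)) : Std.HashSet (Int × Int) :=
  visited.toList.foldl (fun acc mn => pvMats.foldl (pvStepB p mn) acc) visited

-- B's `while True` loop; same totality-guard fuel as A's port
def pvLoopB (p : Int) (fuel : Nat) (visited : Std.HashSet (Int × Int)) : Int :=
  match fuel with
  | 0 => (visited.size : Int)
  | Nat.succ fuel =>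
    let old : Int := (visited.size : Int)
    let v' := pvPassB p visited
    if (v'.size : Int) = old then (v'.size : Int) else pvLoopB p fuel v'

def orbit_bfs_alt (p : Int) : Int :=
  let s0 : Int × Int := (PySem.Int.mod 2 p, PySem.Int.mod 1 p)
  pvLoopB p (p.natAbs * p.natAbs + 1) ((∅ : Std.HashSet (Int × Int)).insert s0)

-- ===== PRECONDITION & SPEC =====
-- Python A raises ZeroDivisionError at p = 0 (the `% p` in apply_mat); exactly that input is excluded.
def Pre_orbit_bfs (p : Int) : Prop := p ≠ 0
instance (p : Int) : Decidable (Pre_orbit_bfs p) := by unfold Pre_orbit_bfs; infer_instance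
def pvWitness_orbit_bfs : Int := 5

def Spec_orbit_bfs (p : Int) (out : Int) : Prop := out = orbit_bfs_alt p
instance (p : Int) (out : Int) : Decidable (Spec_orbit_bfs p out) := by unfold Spec_orbit_bfs; infer_instance

-- ===== CLAIM (what is proved, stated in full; the proofs are below) =====
def Claim_equal_orbit_bfs : Prop := ∀ (p : Int), Dom_orbit_bfs p → Pre_orbit_bfs p → Spec_orbit_bfs p (orbit_bfs p)

-- ===== LEMMAS AND PROOFS =====

-- fresh-block description of one inner/outer fold: the set after the fold is the set
-- before it plus a Nodup list d of fresh states, of known membership and size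
theorem pvInnerA_spec (p : Int) (mn : Int × Int) :
    ∀ (ms : List ((Int × Int) × (Int × Int))) (V : Std.HashSet (Int × Int)) (acc : List (Int × Int)),
    ∃ (V' : Std.HashSet (Int × Int)) (d : List (Int × Int)),
      ms.foldl (pvStepA p mn) (V, acc) = (V', acc ++ d)
      ∧ (∀ y, y ∈ V' ↔ y ∈ V ∨ y ∈ d)
      ∧ (∀ y ∈ d, y ∉ V)
      ∧ d.Nodup
      ∧ (∀ y, (y ∈ V ∨ y ∈ d) ↔ y ∈ V ∨ ∃ mat ∈ ms, y = pvApplyMat mat mn.1 mn.2 p)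
      ∧ V'.size = V.size + d.length := by
  intro ms
  induction ms with
  | nil => intro V acc; exact ⟨V, [], by simp, by simp, by simp, by simp, by simp, by simp⟩
  | cons mat ms ih =>
    intro V acc
    by_cases hs : pvApplyMat mat mn.1 mn.2 p ∈ V
    · obtain ⟨V', d, h1, h2, h3, h4, h5, h6⟩ := ih V acc
      refine ⟨V', d, ?_, h2, h3, h4, ?_, h6⟩
      · simpa [pvStepA, hs] using h1
      · intro y
        rw [h5 y]
        constructor
        · rintro (h | ⟨m, hm, rfl⟩)
          · exact Or.inl h
          · exact Or.inr ⟨m, List.mem_cons_of_mem _ hm, rfl⟩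
        · rintro (h | ⟨m, hm, rfl⟩)
          · exact Or.inl h
          · rcases List.mem_cons.1 hm with rfl | hm'
            · exact Or.inl hs
            · exact Or.inr ⟨m, hm', rfl⟩
    · obtain ⟨V', d, h1, h2, h3, h4, h5, h6⟩ :=
        ih (V.insert (pvApplyMat mat mn.1 mn.2 p)) (acc ++ [pvApplyMat mat mn.1 mn.2 p])
      have hmemI : ∀ y, y ∈ V.insert (pvApplyMat mat mn.1 mn.2 p) ↔
          y = pvApplyMat mat mn.1 mn.2 p ∨ y ∈ V := by
        intro y; rw [Std.HashSet.mem_insert, beq_iff_eq, eq_comm]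
      refine ⟨V', pvApplyMat mat mn.1 mn.2 p :: d, ?_, ?_, ?_, ?_, ?_, ?_⟩
      · simpa [pvStepA, hs, List.append_assoc] using h1
      · intro y
        rw [h2 y, hmemI y]
        constructor
        · rintro ((rfl | h) | h)
          · exact Or.inr (List.mem_cons_self ..)
          · exact Or.inl h
          · exact Or.inr (List.mem_cons_of_mem _ h)
        · rintro (h | h)
          · exact Or.inl (Or.inr h)
          · rcases List.mem_cons.1 h with rfl | h'
            · exact Or.inl (Or.inl rfl)
            · exact Or.inr h'
      · intro y hy
        rcases List.mem_cons.1 hy with rfl | hy'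
        · exact hs
        · intro hyV
          exact h3 y hy' ((hmemI y).2 (Or.inr hyV))
      · refine List.nodup_cons.2 ⟨?_, h4⟩
        intro hmem
        exact h3 _ hmem ((hmemI _).2 (Or.inl rfl))
      · intro y
        have h := h5 y
        rw [hmemI y] at h
        constructor
        · rintro (hy | hy)
          · exact Or.inl hy
          · rcases List.mem_cons.1 hy with heq | hy'
            · exact Or.inr ⟨mat, List.mem_cons_self .., heq⟩
            · rcases h.1 (Or.inr hy') with (heq | hV) | ⟨m, hm, heq⟩
              · exact Or.inr ⟨mat, List.mem_cons_self .., heq⟩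
              · exact Or.inl hV
              · exact Or.inr ⟨m, List.mem_cons_of_mem _ hm, heq⟩
        · rintro (hy | ⟨m, hm, heq⟩)
          · exact Or.inl hy
          · rcases List.mem_cons.1 hm with hmm | hm'
            · exact Or.inr (by rw [heq, hmm]; exact List.mem_cons_self ..)
            · rcases h.2 (Or.inr ⟨m, hm', heq⟩) with (heq2 | hV) | hd
              · exact Or.inr (by rw [heq2]; exact List.mem_cons_self ..)
              · exact Or.inl hV
              · exact Or.inr (List.mem_cons_of_mem _ hd)
      · have : (V.insert (pvApplyMat mat mn.1 mn.2 p)).size = V.size + 1 := by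
          rw [Std.HashSet.size_insert]; simp [hs]
        rw [h6, this, List.length_cons]; omega

-- A's outer loop over the queue
theorem pvFoldA_spec (p : Int) :
    ∀ (Q : List (Int × Int)) (V : Std.HashSet (Int × Int)) (acc : List (Int × Int)),
    ∃ (V' : Std.HashSet (Int × Int)) (d : List (Int × Int)),
      Q.foldl (fun st mn => pvMats.foldl (pvStepA p mn) st) (V, acc) = (V', acc ++ d)
      ∧ (∀ y, y ∈ V' ↔ y ∈ V ∨ y ∈ d)
      ∧ (∀ y ∈ d, y ∉ V)
      ∧ d.Nodup
      ∧ (∀ y, (y ∈ V ∨ y ∈ d) ↔ y ∈ V ∨ ∃ x ∈ Q, ∃ mat ∈ pvMats, y = pvApplyMat mat x.1 x.2 p)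
      ∧ V'.size = V.size + d.length := by
  intro Q
  induction Q with
  | nil => intro V acc; exact ⟨V, [], by simp, by simp, by simp, by simp, by simp, by simp⟩
  | cons x Q ih =>
    intro V acc
    obtain ⟨V1, d1, e1, m1, f1, n1, c1, s1⟩ := pvInnerA_spec p x pvMats V acc
    obtain ⟨V2, d2, e2, m2, f2, n2, c2, s2⟩ := ih V1 (acc ++ d1)
    have hd2V : ∀ y ∈ d2, y ∉ V := fun y hy hyV => f2 y hy ((m1 y).2 (Or.inl hyV))
    have hd2d1 : ∀ y ∈ d2, y ∉ d1 := fun y hy hyd => f2 y hy ((m1 y).2 (Or.inr hyd))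
    refine ⟨V2, d1 ++ d2, ?_, ?_, ?_, ?_, ?_, ?_⟩
    · simp only [List.foldl_cons, e1, e2, List.append_assoc]
    · intro y
      rw [m2 y, m1 y, List.mem_append]; exact or_assoc
    · intro y hy
      rcases List.mem_append.1 hy with hy | hy
      · exact f1 y hy
      · exact hd2V y hy
    · refine List.nodup_append.2 ⟨n1, n2, ?_⟩
      intro a ha1 b hb heq
      exact hd2d1 b hb (heq ▸ ha1)
    · intro y
      have h1 := c1 y
      have h2 := c2 y
      rw [m1 y] at h2
      constructor
      · rintro (hy | hy)
        · exact Or.inl hy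
        · rcases List.mem_append.1 hy with hy | hy
          · rcases h1.1 (Or.inr hy) with hV | ⟨m, hm, heq⟩
            · exact Or.inl hV
            · exact Or.inr ⟨x, List.mem_cons_self .., m, hm, heq⟩
          · rcases h2.1 (Or.inr hy) with (hV | hd1) | ⟨z, hz, m, hm, heq⟩
            · exact Or.inl hV
            · rcases h1.1 (Or.inr hd1) with hV | ⟨m, hm, heq⟩
              · exact Or.inl hV
              · exact Or.inr ⟨x, List.mem_cons_self .., m, hm, heq⟩
            · exact Or.inr ⟨z, List.mem_cons_of_mem _ hz, m, hm, heq⟩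
      · rintro (hy | ⟨z, hz, m, hm, rfl⟩)
        · exact Or.inl hy
        · rcases List.mem_cons.1 hz with rfl | hz'
          · rcases h1.2 (Or.inr ⟨m, hm, rfl⟩) with hV | hd
            · exact Or.inl hV
            · exact Or.inr (List.mem_append_left _ hd)
          · rcases h2.2 (Or.inr ⟨z, hz', m, hm, rfl⟩) with (hV | hd1) | hd2
            · exact Or.inl hV
            · exact Or.inr (List.mem_append_left _ hd1)
            · exact Or.inr (List.mem_append_right _ hd2)
    · rw [s2, s1, List.length_append]; omega

-- B's inner loop over any list of matrices
theorem pvInnerB_spec (p : Int) (mn : Int × Int) :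
    ∀ (ms : List ((Int × Int) × (Int × Int))) (acc : Std.HashSet (Int × Int)),
    ∃ (W' : Std.HashSet (Int × Int)) (e : List (Int × Int)),
      ms.foldl (pvStepB p mn) acc = W'
      ∧ (∀ y, y ∈ W' ↔ y ∈ acc ∨ y ∈ e)
      ∧ (∀ y ∈ e, y ∉ acc)
      ∧ e.Nodup
      ∧ (∀ y, (y ∈ acc ∨ y ∈ e) ↔ y ∈ acc ∨ ∃ mat ∈ ms, y = pvApplyMat mat mn.1 mn.2 p)
      ∧ W'.size = acc.size + e.length := by
  intro ms
  induction ms with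
  | nil => intro acc; exact ⟨acc, [], by simp, by simp, by simp, by simp, by simp, by simp⟩
  | cons mat ms ih =>
    intro acc
    obtain ⟨W', e, h1, h2, h3, h4, h5, h6⟩ := ih (acc.insert (pvApplyMat mat mn.1 mn.2 p))
    have hmemI : ∀ y, y ∈ acc.insert (pvApplyMat mat mn.1 mn.2 p) ↔
        y = pvApplyMat mat mn.1 mn.2 p ∨ y ∈ acc := by
      intro y; rw [Std.HashSet.mem_insert, beq_iff_eq, eq_comm]
    by_cases hs : pvApplyMat mat mn.1 mn.2 p ∈ acc
    · refine ⟨W', e, by simpa [pvStepB] using h1, ?_, ?_, h4, ?_, ?_⟩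
      · intro y
        rw [h2 y, hmemI y]
        constructor
        · rintro ((heq | h) | h)
          · exact Or.inl (heq ▸ hs)
          · exact Or.inl h
          · exact Or.inr h
        · rintro (h | h)
          · exact Or.inl (Or.inr h)
          · exact Or.inr h
      · intro y hy hyA
        exact h3 y hy ((hmemI y).2 (Or.inr hyA))
      · intro y
        have h := h5 y
        rw [hmemI y] at h
        constructor
        · rintro (hy | hy)
          · exact Or.inl hy
          · rcases h.1 (Or.inr hy) with (heq | hA) | ⟨m, hm, heq⟩
            · exact Or.inl (heq ▸ hs)
            · exact Or.inl hA
            · exact Or.inr ⟨m, List.mem_cons_of_mem _ hm, heq⟩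
        · rintro (hy | ⟨m, hm, heq⟩)
          · exact Or.inl hy
          · rcases List.mem_cons.1 hm with hmm | hm'
            · exact Or.inl (by rw [heq, hmm]; exact hs)
            · rcases h.2 (Or.inr ⟨m, hm', heq⟩) with (heq2 | hA) | he
              · exact Or.inl (heq2 ▸ hs)
              · exact Or.inl hA
              · exact Or.inr he
      · have : (acc.insert (pvApplyMat mat mn.1 mn.2 p)).size = acc.size := by
          rw [Std.HashSet.size_insert]; simp [hs]
        rw [h6, this]
    · refine ⟨W', pvApplyMat mat mn.1 mn.2 p :: e, by simpa [pvStepB] using h1, ?_, ?_, ?_, ?_, ?_⟩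
      · intro y
        rw [h2 y, hmemI y]
        constructor
        · rintro ((rfl | h) | h)
          · exact Or.inr (List.mem_cons_self ..)
          · exact Or.inl h
          · exact Or.inr (List.mem_cons_of_mem _ h)
        · rintro (h | h)
          · exact Or.inl (Or.inr h)
          · rcases List.mem_cons.1 h with rfl | h'
            · exact Or.inl (Or.inl rfl)
            · exact Or.inr h'
      · intro y hy
        rcases List.mem_cons.1 hy with rfl | hy'
        · exact hs
        · intro hyA
          exact h3 y hy' ((hmemI y).2 (Or.inr hyA))
      · refine List.nodup_cons.2 ⟨?_, h4⟩
        intro hmem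
        exact h3 _ hmem ((hmemI _).2 (Or.inl rfl))
      · intro y
        have h := h5 y
        rw [hmemI y] at h
        constructor
        · rintro (hy | hy)
          · exact Or.inl hy
          · rcases List.mem_cons.1 hy with heq | hy'
            · exact Or.inr ⟨mat, List.mem_cons_self .., heq⟩
            · rcases h.1 (Or.inr hy') with (heq | hA) | ⟨m, hm, heq⟩
              · exact Or.inr ⟨mat, List.mem_cons_self .., heq⟩
              · exact Or.inl hA
              · exact Or.inr ⟨m, List.mem_cons_of_mem _ hm, heq⟩
        · rintro (hy | ⟨m, hm, heq⟩)
          · exact Or.inl hy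
          · rcases List.mem_cons.1 hm with hmm | hm'
            · exact Or.inr (by rw [heq, hmm]; exact List.mem_cons_self ..)
            · rcases h.2 (Or.inr ⟨m, hm', heq⟩) with (heq2 | hA) | he
              · exact Or.inr (by rw [heq2]; exact List.mem_cons_self ..)
              · exact Or.inl hA
              · exact Or.inr (List.mem_cons_of_mem _ he)
      · have : (acc.insert (pvApplyMat mat mn.1 mn.2 p)).size = acc.size + 1 := by
          rw [Std.HashSet.size_insert]; simp [hs]
        rw [h6, this, List.length_cons]; omega

-- B's pass over a snapshot list xs
theorem pvFoldB_spec (p : Int) :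
    ∀ (xs : List (Int × Int)) (acc : Std.HashSet (Int × Int)),
    ∃ (W' : Std.HashSet (Int × Int)) (e : List (Int × Int)),
      xs.foldl (fun acc mn => pvMats.foldl (pvStepB p mn) acc) acc = W'
      ∧ (∀ y, y ∈ W' ↔ y ∈ acc ∨ y ∈ e)
      ∧ (∀ y ∈ e, y ∉ acc)
      ∧ e.Nodup
      ∧ (∀ y, (y ∈ acc ∨ y ∈ e) ↔ y ∈ acc ∨ ∃ x ∈ xs, ∃ mat ∈ pvMats, y = pvApplyMat mat x.1 x.2 p)
      ∧ W'.size = acc.size + e.length := by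
  intro xs
  induction xs with
  | nil => intro acc; exact ⟨acc, [], by simp, by simp, by simp, by simp, by simp, by simp⟩
  | cons x xs ih =>
    intro acc
    obtain ⟨W1, e1, h1, m1, f1, n1, c1, s1⟩ := pvInnerB_spec p x pvMats acc
    obtain ⟨W2, e2, h2, m2, f2, n2, c2, s2⟩ := ih W1
    have he2A : ∀ y ∈ e2, y ∉ acc := fun y hy hyA => f2 y hy ((m1 y).2 (Or.inl hyA))
    have he2e1 : ∀ y ∈ e2, y ∉ e1 := fun y hy hyd => f2 y hy ((m1 y).2 (Or.inr hyd))
    refine ⟨W2, e1 ++ e2, ?_, ?_, ?_, ?_, ?_, ?_⟩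
    · simp only [List.foldl_cons, h1, h2]
    · intro y
      rw [m2 y, m1 y, List.mem_append]; exact or_assoc
    · intro y hy
      rcases List.mem_append.1 hy with hy | hy
      · exact f1 y hy
      · exact he2A y hy
    · refine List.nodup_append.2 ⟨n1, n2, ?_⟩
      intro a ha1 b hb heq
      exact he2e1 b hb (heq ▸ ha1)
    · intro y
      have hc1 := c1 y
      have hc2 := c2 y
      rw [m1 y] at hc2
      constructor
      · rintro (hy | hy)
        · exact Or.inl hy
        · rcases List.mem_append.1 hy with hy | hy
          · rcases hc1.1 (Or.inr hy) with hA | ⟨m, hm, heq⟩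
            · exact Or.inl hA
            · exact Or.inr ⟨x, List.mem_cons_self .., m, hm, heq⟩
          · rcases hc2.1 (Or.inr hy) with (hA | he1) | ⟨z, hz, m, hm, heq⟩
            · exact Or.inl hA
            · rcases hc1.1 (Or.inr he1) with hA | ⟨m, hm, heq⟩
              · exact Or.inl hA
              · exact Or.inr ⟨x, List.mem_cons_self .., m, hm, heq⟩
            · exact Or.inr ⟨z, List.mem_cons_of_mem _ hz, m, hm, heq⟩
      · rintro (hy | ⟨z, hz, m, hm, rfl⟩)
        · exact Or.inl hy
        · rcases List.mem_cons.1 hz with rfl | hz'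
          · rcases hc1.2 (Or.inr ⟨m, hm, rfl⟩) with hA | he
            · exact Or.inl hA
            · exact Or.inr (List.mem_append_left _ he)
          · rcases hc2.2 (Or.inr ⟨z, hz', m, hm, rfl⟩) with (hA | he1) | he2
            · exact Or.inl hA
            · exact Or.inr (List.mem_append_left _ he1)
            · exact Or.inr (List.mem_append_right _ he2)
    · rw [s2, s1, List.length_append]; omega

theorem pvLoopA_nil (p : Int) (V : Std.HashSet (Int × Int)) :
    ∀ fuel : Nat, pvLoopA p fuel V [] = (V.size : Int) := by
  intro fuel; cases fuel <;> simp [pvLoopA]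

-- two hash sets with the same members have the same size (via their Nodup toLists)
theorem pvSize_eq_of_mem_iff {V W : Std.HashSet (Int × Int)}
    (h : ∀ y, y ∈ V ↔ y ∈ W) : V.size = W.size := by
  have hV : V.toList.Nodup := List.Pairwise.imp (by simp) (Std.HashSet.distinct_toList (m := V))
  have hW : W.toList.Nodup := List.Pairwise.imp (by simp) (Std.HashSet.distinct_toList (m := W))
  have hmem : ∀ y, y ∈ V.toList ↔ y ∈ W.toList := by
    intro y; rw [Std.HashSet.mem_toList, Std.HashSet.mem_toList]; exact h y
  have hp : V.toList.Perm W.toList := (List.perm_ext_iff_of_nodup hV hW).2 hmem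
  rw [← Std.HashSet.length_toList, ← Std.HashSet.length_toList]
  exact hp.length_eq

-- main simulation: A's frontier BFS and B's whole-set iteration agree, any common fuel
theorem pvSim (p : Int) :
    ∀ (fuel : Nat) (V : Std.HashSet (Int × Int)) (Q : List (Int × Int)) (W : Std.HashSet (Int × Int)),
    (∀ y, y ∈ V ↔ y ∈ W) →
    (∀ x ∈ Q, x ∈ V) →
    (∀ x ∈ V, x ∉ Q → ∀ mat ∈ pvMats, pvApplyMat mat x.1 x.2 p ∈ V) →
    pvLoopA p fuel V Q = pvLoopB p fuel W := by
  intro fuel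
  induction fuel with
  | zero =>
    intro V Q W hVW hQV hInv
    show ((V.size : Int)) = ((W.size : Int))
    exact_mod_cast pvSize_eq_of_mem_iff hVW
  | succ fuel ih =>
    intro V Q W hVW hQV hInv
    obtain ⟨W', e, heq, hmem, hfresh, hnde, hchar, hsz⟩ := pvFoldB_spec p W.toList W
    have hpassEq : pvPassB p W = W' := by unfold pvPassB; exact heq
    have hcharW : ∀ y, (y ∈ W ∨ y ∈ e) ↔ y ∈ W ∨ ∃ x, x ∈ W ∧ ∃ mat ∈ pvMats, y = pvApplyMat mat x.1 x.2 p := by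
      intro y
      rw [hchar y]
      constructor
      · rintro (h | ⟨x, hx, m, hm, rfl⟩)
        · exact Or.inl h
        · exact Or.inr ⟨x, Std.HashSet.mem_toList.1 hx, m, hm, rfl⟩
      · rintro (h | ⟨x, hx, m, hm, rfl⟩)
        · exact Or.inl h
        · exact Or.inr ⟨x, Std.HashSet.mem_toList.2 hx, m, hm, rfl⟩
    by_cases hQ : Q = []
    · -- A's queue is empty: the invariant makes B's pass add nothing
      have hE : e = [] := by
        rw [List.eq_nil_iff_forall_not_mem]
        intro y hy
        rcases (hcharW y).1 (Or.inr hy) with hyW | ⟨x, hxW, m, hm, rfl⟩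
        · exact hfresh y hy hyW
        · have hxV : x ∈ V := (hVW x).2 hxW
          have : pvApplyMat m x.1 x.2 p ∈ V := hInv x hxV (by simp [hQ]) m hm
          exact hfresh _ hy ((hVW _).1 this)
      have hstop : (W'.size : Int) = (W.size : Int) := by
        rw [hsz, hE]; simp
      have hL : pvLoopA p (fuel + 1) V Q = (V.size : Int) := by
        simp [pvLoopA, hQ]
      have hR : pvLoopB p (fuel + 1) W = (W.size : Int) := by
        show (if ((pvPassB p W).size : Int) = (W.size : Int) then ((pvPassB p W).size : Int)
              else pvLoopB p fuel (pvPassB p W)) = (W.size : Int)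
        rw [hpassEq, if_pos hstop, hstop]
      rw [hL, hR]
      exact_mod_cast pvSize_eq_of_mem_iff hVW
    · obtain ⟨V', d, aeq, amem, afresh, andp, achar, asz⟩ := pvFoldA_spec p Q V []
      have acharQ : ∀ y, (y ∈ V ∨ y ∈ d) ↔ y ∈ V ∨ ∃ x ∈ Q, ∃ mat ∈ pvMats, y = pvApplyMat mat x.1 x.2 p := achar
      have hA : pvLoopA p (fuel + 1) V Q = pvLoopA p fuel V' d := by
        simp only [pvLoopA, if_neg hQ, aeq, List.nil_append]
      by_cases hlen : ((pvPassB p W).size : Int) = (W.size : Int)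
      · -- B stops: its pass added nothing, hence A's round added nothing either
        have hE : e = [] := by
          have h1 : W'.size = W.size := by
            have := hlen; rw [hpassEq] at this; exact_mod_cast this
          rw [hsz] at h1
          exact List.eq_nil_of_length_eq_zero (by omega)
        have hNW : ∀ x ∈ W, ∀ m ∈ pvMats, pvApplyMat m x.1 x.2 p ∈ W := by
          intro x hx m hm
          rcases (hcharW _).2 (Or.inr ⟨x, hx, m, hm, rfl⟩) with h | h
          · exact h
          · exact absurd h (by simp [hE])
        have hD : d = [] := by
          rw [List.eq_nil_iff_forall_not_mem]
          intro y hy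
          rcases (acharQ y).1 (Or.inr hy) with hyV | ⟨x, hxQ, m, hm, rfl⟩
          · exact afresh y hy hyV
          · have hxW : x ∈ W := (hVW x).1 (hQV x hxQ)
            have : pvApplyMat m x.1 x.2 p ∈ W := hNW x hxW m hm
            exact afresh _ hy ((hVW _).2 this)
        have hB : pvLoopB p (fuel + 1) W = ((pvPassB p W).size : Int) := by
          show (if ((pvPassB p W).size : Int) = (W.size : Int) then ((pvPassB p W).size : Int)
                else pvLoopB p fuel (pvPassB p W)) = ((pvPassB p W).size : Int)
          rw [if_pos hlen]
        have hVsz : V'.size = V.size := by rw [asz, hD]; simp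
        rw [hA, hD, pvLoopA_nil, hB, hlen, hVsz]
        exact_mod_cast pvSize_eq_of_mem_iff hVW
      · -- both recurse: apply the induction hypothesis to the new states
        have hB : pvLoopB p (fuel + 1) W = pvLoopB p fuel (pvPassB p W) := by
          show (if ((pvPassB p W).size : Int) = (W.size : Int) then ((pvPassB p W).size : Int)
                else pvLoopB p fuel (pvPassB p W)) = pvLoopB p fuel (pvPassB p W)
          rw [if_neg hlen]
        rw [hA, hB, hpassEq]
        apply ih V' d W'
        · -- same members
          intro y
          rw [amem y, hmem y]
          rw [show (y ∈ V ∨ y ∈ d) ↔ _ from acharQ y, show (y ∈ W ∨ y ∈ e) ↔ _ from hcharW y]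
          constructor
          · rintro (hyV | ⟨x, hxQ, m, hm, rfl⟩)
            · exact Or.inl ((hVW y).1 hyV)
            · exact Or.inr ⟨x, (hVW x).1 (hQV x hxQ), m, hm, rfl⟩
          · rintro (hyW | ⟨x, hxW, m, hm, rfl⟩)
            · exact Or.inl ((hVW y).2 hyW)
            · have hxV : x ∈ V := (hVW x).2 hxW
              by_cases hxQ : x ∈ Q
              · exact Or.inr ⟨x, hxQ, m, hm, rfl⟩
              · exact Or.inl (hInv x hxV hxQ m hm)
        · intro x hx; exact (amem x).2 (Or.inr hx)
        · -- invariant for the new state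
          intro x hx hxd m hm
          have hxV : x ∈ V := by
            rcases (amem x).1 hx with h | h
            · exact h
            · exact absurd h hxd
          by_cases hxQ : x ∈ Q
          · exact (amem _).2 ((acharQ _).2 (Or.inr ⟨x, hxQ, m, hm, rfl⟩))
          · exact (amem _).2 (Or.inl (hInv x hxV hxQ m hm))

-- ===== VERDICT (by name: the statement is the Claim_ definition above) =====
theorem orbit_bfs_spec : Claim_equal_orbit_bfs := by
  intro p _ _
  unfold Spec_orbit_bfs
  show pvLoopA p (p.natAbs * p.natAbs + 1)
        ((∅ : Std.HashSet (Int × Int)).insert (PySem.Int.mod 2 p, PySem.Int.mod 1 p))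
        [(PySem.Int.mod 2 p, PySem.Int.mod 1 p)]
      = pvLoopB p (p.natAbs * p.natAbs + 1)
        ((∅ : Std.HashSet (Int × Int)).insert (PySem.Int.mod 2 p, PySem.Int.mod 1 p))
  apply pvSim
  · intro y; exact Iff.rfl
  · intro x hx
    rcases List.mem_singleton.1 hx with rfl
    simp [Std.HashSet.mem_insert]
  · intro x hx hnx
    exfalso
    apply hnx
    have : x = (PySem.Int.mod 2 p, PySem.Int.mod 1 p) := by
      have := Std.HashSet.mem_insert.1 hx
      rcases this with h | h
      · exact (beq_iff_eq.1 h).symm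
      · exact absurd h (by simp)
    simp [this]
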